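-- pv_equiv track=rewrite | github.com/Vineet-Sharma-Medium-Stories/Medium-Build-Tool | story-list-builder.py | encode_path_for_markdown
-- ===== SOURCE A (Python) =====
-- def encode_path_for_markdown(path):
--     """
--     Encode special characters in path for markdown links
--     """
--     parts = path.split('/')
--     encoded_parts = []
--     for part in parts:
--         encoded_part = part.replace(' ', '%20')
--         encoded_part = encoded_part.replace('(', '%28')
--         encoded_part = encoded_part.replace(')', '%29')
--         encoded_part = encoded_part.replace(':', '%3A')
--         encoded_parts.append(encoded_part)
--     return '/'.join(encoded_parts)
-- ===== SOURCE B (Python) =====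
-- _MAPPING = {' ': '%20', '(': '%28', ')': '%29', ':': '%3A'}
--
-- def encode_path_for_markdown(path):
--     """
--     Encode special characters in path for markdown links
--     """
--     return ''.join(_MAPPING.get(c, c) for c in path)
-- ===== Notes on version B (the rewrite author's own statement) =====
-- stated objective: idiomatic
-- what changed: Replaced the split-on-slash / four-sequential-replace / rejoin pipeline by a single character-level pass that joins table lookups (mapping.get(c, c) for each character); the split and rejoin are a no-op because the slash is never replaced, and no replacement output contains another target character, so one ordered pass equals the four scans.
import Mathlib
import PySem

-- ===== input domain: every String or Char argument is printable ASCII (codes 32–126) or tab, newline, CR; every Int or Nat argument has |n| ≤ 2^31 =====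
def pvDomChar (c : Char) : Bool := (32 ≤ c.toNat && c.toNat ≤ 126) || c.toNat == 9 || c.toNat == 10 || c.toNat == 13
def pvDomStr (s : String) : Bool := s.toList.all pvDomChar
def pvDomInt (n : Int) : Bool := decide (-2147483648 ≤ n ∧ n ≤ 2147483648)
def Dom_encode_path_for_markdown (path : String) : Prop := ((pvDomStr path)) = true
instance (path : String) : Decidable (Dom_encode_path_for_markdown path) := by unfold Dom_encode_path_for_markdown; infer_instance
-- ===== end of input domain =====

-- B replaces the split('/') / four-sequential-replace / join pipeline by a single
-- character-level pass over the string using a lookup table (idiomatic, same cost).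


-- ===== PORT A =====
def encode_path_for_markdown (path : String) : String :=
  let parts := PySem.Chars.splitOn path.toList ['/']
  let encoded_parts := parts.foldl (fun acc part =>
    let e1 := PySem.Chars.replace part [' '] ['%', '2', '0']
    let e2 := PySem.Chars.replace e1 ['('] ['%', '2', '8']
    let e3 := PySem.Chars.replace e2 [')'] ['%', '2', '9']
    let e4 := PySem.Chars.replace e3 [':'] ['%', '3', 'A']
    acc ++ [e4]) []
  String.ofList (PySem.Chars.join ['/'] encoded_parts)

-- ===== PORT B =====
def pvMapping : PySem.Dict Char (List Char) :=
  ((((PySem.Dict.empty).insert ' ' ['%', '2', '0']).insert '(' ['%', '2', '8']).insert ')' ['%', '2', '9']).insert ':' ['%', '3', 'A']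

def encode_path_for_markdown_alt (path : String) : String :=
  String.ofList (PySem.Chars.join [] (path.toList.map (fun c => (pvMapping.get? c).getD [c])))

-- ===== PRECONDITION & SPEC =====
def Spec_encode_path_for_markdown (path : String) (out : String) : Prop := out = encode_path_for_markdown_alt path
instance (path : String) (out : String) : Decidable (Spec_encode_path_for_markdown path out) := by unfold Spec_encode_path_for_markdown; infer_instance

-- ===== CLAIM (what is proved, stated in full; the proofs are below) =====
def Claim_equal_encode_path_for_markdown : Prop := ∀ (path : String), Dom_encode_path_for_markdown path → Spec_encode_path_for_markdown path (encode_path_for_markdown path)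

-- ===== LEMMAS AND PROOFS =====

-- the character table as a function
def pvEnc (c : Char) : List Char := (pvMapping.get? c).getD [c]

lemma pvEnc_eq (c : Char) :
    pvEnc c = if c = ' ' then ['%', '2', '0'] else if c = '(' then ['%', '2', '8']
      else if c = ')' then ['%', '2', '9'] else if c = ':' then ['%', '3', 'A'] else [c] := by
  unfold pvEnc pvMapping
  by_cases h1 : c = ' '
  · subst h1; decide
  by_cases h2 : c = '('
  · subst h2; decide
  by_cases h3 : c = ')'
  · subst h3; decide
  by_cases h4 : c = ':'
  · subst h4; decide
  have e1 : (' ' == c) = false := beq_eq_false_iff_ne.mpr (Ne.symm h1)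
  have e2 : ('(' == c) = false := beq_eq_false_iff_ne.mpr (Ne.symm h2)
  have e3 : (')' == c) = false := beq_eq_false_iff_ne.mpr (Ne.symm h3)
  have e4 : (':' == c) = false := beq_eq_false_iff_ne.mpr (Ne.symm h4)
  simp [PySem.Dict.get?, PySem.Dict.insert, PySem.Dict.empty, List.find?,
    e1, e2, e3, e4, h1, h2, h3, h4]

-- replace with a single-character pattern is a flatMap
lemma replace_go_single (o : Char) (new : List Char) :
    ∀ (s : List Char) (fuel : Nat) (acc : List Char), s.length ≤ fuel →
      PySem.Chars.replace.go [o] new fuel s acc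
        = acc.reverse ++ s.flatMap (fun c => if c = o then new else [c]) := by
  intro s
  induction s with
  | nil => intro fuel acc _; cases fuel <;> simp [PySem.Chars.replace.go]
  | cons c t ih =>
    intro fuel acc h
    cases fuel with
    | zero => simp at h
    | succ f =>
      simp only [PySem.Chars.replace.go, List.isPrefixOf, List.flatMap_cons]
      by_cases hc : o = c
      · subst hc
        simp [ih f _ (by simpa using h)]
      · simp [hc, Ne.symm hc, ih f _ (by simpa using h)]

lemma replace_single (o : Char) (new s : List Char) :
    PySem.Chars.replace s [o] new = s.flatMap (fun c => if c = o then new else [c]) := by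
  simp [PySem.Chars.replace, replace_go_single o new s s.length [] le_rfl]

-- the pieces produced by splitOn with a single-character separator
def pvPieces (sl : Char) : List Char → List Char → List (List Char)
  | cur, [] => [cur.reverse]
  | cur, c :: t => if c = sl then cur.reverse :: pvPieces sl [] t else pvPieces sl (c :: cur) t

lemma pvPieces_ne_nil (sl : Char) : ∀ (l cur : List Char), pvPieces sl cur l ≠ [] := by
  intro l
  induction l with
  | nil => intro cur; simp [pvPieces]
  | cons c t ih => intro cur; by_cases h : c = sl <;> simp [pvPieces, h, ih]

lemma splitOn_go_single (sl : Char) :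
    ∀ (l : List Char) (fuel : Nat) (cur : List Char) (acc : List (List Char)), l.length ≤ fuel →
      PySem.Chars.splitOn.go [sl] fuel l cur acc = acc.reverse ++ pvPieces sl cur l := by
  intro l
  induction l with
  | nil => intro fuel cur acc _; cases fuel <;> simp [PySem.Chars.splitOn.go, pvPieces]
  | cons c t ih =>
    intro fuel cur acc h
    cases fuel with
    | zero => simp at h
    | succ f =>
      simp only [PySem.Chars.splitOn.go, List.isPrefixOf, pvPieces]
      by_cases hc : sl = c
      · subst hc
        simp [ih f [] _ (by simpa using h)]
      · simp [hc, Ne.symm hc, ih f (c :: cur) acc (by simpa using h)]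

lemma join_pvPieces (sl : Char) :
    ∀ (l cur : List Char), PySem.Chars.join [sl] (pvPieces sl cur l) = cur.reverse ++ l := by
  intro l
  induction l with
  | nil => intro cur; simp [pvPieces, PySem.Chars.join_singleton]
  | cons c t ih =>
    intro cur
    by_cases h : c = sl
    · subst h
      obtain ⟨p, ps, hps⟩ := List.exists_cons_of_ne_nil (pvPieces_ne_nil c t [])
      have ht := ih ([] : List Char)
      rw [hps] at ht
      rw [show pvPieces c cur (c :: t) = cur.reverse :: pvPieces c [] t from by
        simp [pvPieces], hps, PySem.Chars.join_cons_cons, ht]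
      simp
    · simp only [pvPieces, if_neg h]
      simpa using ih (c :: cur)

lemma splitOn_single (sl : Char) (s : List Char) :
    PySem.Chars.splitOn s [sl] = pvPieces sl [] s := by
  simpa [PySem.Chars.splitOn] using splitOn_go_single sl s (s.length + 1) [] [] (by omega)

-- flatMap with a '/'-preserving, '/'-free-output table commutes with join "/"
lemma join_map_flatMap (sl : Char) (f : Char → List Char) (hf : f sl = [sl]) :
    ∀ (parts : List (List Char)),
      PySem.Chars.join [sl] (parts.map (List.flatMap f))
        = (PySem.Chars.join [sl] parts).flatMap f := by
  intro parts
  induction parts with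
  | nil => simp [PySem.Chars.join, List.intercalate]
  | cons x xs ih =>
    cases xs with
    | nil => simp [PySem.Chars.join_singleton]
    | cons y ys =>
      simp only [List.map_cons, PySem.Chars.join_cons_cons] at *
      simp [ih, hf]

lemma join_nil_eq_flatten : ∀ (parts : List (List Char)),
    PySem.Chars.join [] parts = parts.flatten := by
  intro parts
  induction parts with
  | nil => simp [PySem.Chars.join, List.intercalate]
  | cons x xs ih =>
    cases xs with
    | nil => simp [PySem.Chars.join_singleton]
    | cons y ys => simp only [PySem.Chars.join_cons_cons] at *; simp [ih]

-- the four ordered replaces on one part equal one table pass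
lemma chain_eq_flatMap (part : List Char) :
    PySem.Chars.replace (PySem.Chars.replace (PySem.Chars.replace (PySem.Chars.replace
      part [' '] ['%', '2', '0']) ['('] ['%', '2', '8']) [')'] ['%', '2', '9']) [':'] ['%', '3', 'A']
      = part.flatMap pvEnc := by
  simp only [replace_single, List.flatMap_assoc]
  refine List.flatMap_congr (fun c _ => ?_)
  rw [pvEnc_eq]
  by_cases h1 : c = ' ' <;> by_cases h2 : c = '(' <;> by_cases h3 : c = ')' <;>
    by_cases h4 : c = ':' <;> simp_all

lemma foldl_append_map (R : List Char → List Char) :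
    ∀ (parts : List (List Char)) (acc : List (List Char)),
      parts.foldl (fun acc part => acc ++ [R part]) acc = acc ++ parts.map R := by
  intro parts
  induction parts with
  | nil => simp
  | cons x xs ih => intro acc; simp [ih]

-- ===== VERDICT (by name: the statement is the Claim_ definition above) =====
theorem encode_path_for_markdown_spec : Claim_equal_encode_path_for_markdown := by
  intro path _
  show _ = _
  unfold encode_path_for_markdown encode_path_for_markdown_alt
  simp only [foldl_append_map, chain_eq_flatMap, join_nil_eq_flatten, List.nil_append]
  rw [show (fun c => (pvMapping.get? c).getD [c]) = pvEnc from rfl,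
    join_map_flatMap '/' pvEnc (by rw [pvEnc_eq]; decide), splitOn_single,
    join_pvPieces, List.flatMap_def]
  simp
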